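-- pv_equiv track=rewrite | github.com/mashingaan/AirDocs | airdocs/utils/path_builder.py | _clean_for_path
-- ===== SOURCE A (Python) =====
-- def _clean_for_path(text: str) -> str:
--     """
--     Clean text for use in file/directory names.
--
--     Removes/replaces characters that are invalid in Windows paths.
--     """
--     # Characters invalid in Windows filenames
--     invalid_chars = '<>:"/\\|?*'
--
--     result = text
--     for char in invalid_chars:
--         result = result.replace(char, "_")
--
--     # Remove leading/trailing spaces and dots
--     result = result.strip(". ")
--
--     # Limit length
--     if len(result) > 100:
--         result = result[:100]
--
--     return result
-- ===== SOURCE B (Python) =====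
-- def _clean_for_path(text: str) -> str:
--     """One pass over the text, then index-based leading trim, a pop-loop trailing trim,
--     and an unconditional [:100] truncation (same result as the staged-replace version)."""
--     invalid = '<>:"/\\|?*'
--
--     chars = []
--     for ch in text:
--         chars.append("_" if ch in invalid else ch)
--
--     # drop leading '.' and ' '
--     i = 0
--     while i < len(chars) and chars[i] in ". ":
--         i += 1
--     chars = chars[i:]
--
--     # drop trailing '.' and ' '
--     while chars and chars[-1] in ". ":
--         chars.pop()
--
--     return "".join(chars[:100])
-- ===== Notes on version B (the rewrite author's own statement) =====
-- stated objective: alternative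
-- what changed: Replaces the nine sequential full-string str.replace passes plus strip('. ') with a single character pass building a list, then an index-advancing leading-trim loop, a pop() trailing-trim loop, and an unconditional [:100] slice.
import Mathlib
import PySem

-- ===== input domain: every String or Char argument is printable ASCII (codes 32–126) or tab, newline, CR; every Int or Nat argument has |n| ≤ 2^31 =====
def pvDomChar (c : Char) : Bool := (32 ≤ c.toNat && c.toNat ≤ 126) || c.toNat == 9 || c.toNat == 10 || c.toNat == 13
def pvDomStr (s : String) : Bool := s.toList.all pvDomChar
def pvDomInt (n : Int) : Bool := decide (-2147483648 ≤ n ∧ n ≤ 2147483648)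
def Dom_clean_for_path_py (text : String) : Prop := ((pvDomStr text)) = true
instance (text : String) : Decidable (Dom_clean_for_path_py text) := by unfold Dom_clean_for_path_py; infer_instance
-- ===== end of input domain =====

-- B builds the char list in one pass, trims '. ' with an index loop and a pop loop,
-- and truncates with an unconditional take 100, instead of A's nine full-string
-- replaces + strip + conditional slice (alternative decomposition, same values).


-- ===== PORT A =====
def clean_for_path_py (text : String) : String :=
  let invalid_chars : String := "<>:\"/\\|?*"
  let result := invalid_chars.toList.foldl
    (fun r char => PySem.Str.replace r (String.ofList [char]) "_") text
  let result := PySem.Str.stripChars result ". "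
  if PySem.Str.len result > 100 then PySem.Str.slice result none (some 100) else result

-- ===== PORT B =====
-- the one pass over the text ('for ch in text: chars.append(...)')
def pvSanitize : List Char → List Char
  | [] => []
  | ch :: t => (if "<>:\"/\\|?*".toList.contains ch then '_' else ch) :: pvSanitize t

-- the 'while i < len(chars) and chars[i] in ". ": i += 1' loop (returns the final i)
def pvLeadCount : List Char → Nat
  | [] => 0
  | c :: t => if [' ', '.'].contains c then pvLeadCount t + 1 else 0

-- the 'while chars and chars[-1] in ". ": chars.pop()' loop
def pvTrimRight (l : List Char) : List Char :=
  if h : l = [] then l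
  else if [' ', '.'].contains (l.getLast h) then pvTrimRight l.dropLast
  else l
termination_by l.length
decreasing_by
  have : l.length ≠ 0 := by simpa using congrArg List.length ∘ (fun e : l = [] => e) |>.mt (by simpa using h)
  simp [List.length_dropLast]; omega

def clean_for_path_py_alt (text : String) : String :=
  let chars := pvSanitize text.toList
  let chars := chars.drop (pvLeadCount chars)
  let chars := pvTrimRight chars
  String.ofList (chars.take 100)

-- ===== PRECONDITION & SPEC =====
def Spec_clean_for_path_py (text : String) (out : String) : Prop := out = clean_for_path_py_alt text
instance (text : String) (out : String) : Decidable (Spec_clean_for_path_py text out) := by unfold Spec_clean_for_path_py; infer_instance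

-- ===== CLAIM (what is proved, stated in full; the proofs are below) =====
def Claim_equal_clean_for_path_py : Prop := ∀ (text : String), Dom_clean_for_path_py text → Spec_clean_for_path_py text (clean_for_path_py text)

-- ===== LEMMAS AND PROOFS =====

-- replace with a single-character pattern is a pointwise map
theorem replace_go_single (a b : Char) :
    ∀ (l : List Char) (fuel : Nat) (acc : List Char), l.length ≤ fuel →
      PySem.Chars.replace.go [a] [b] fuel l acc
        = acc.reverse ++ l.map (fun x => if x = a then b else x) := by
  intro l
  induction l with
  | nil =>
      intro fuel acc _
      cases fuel <;> simp [PySem.Chars.replace.go]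
  | cons c t ih =>
      intro fuel acc hle
      cases fuel with
      | zero => simp at hle
      | succ n =>
        simp only [PySem.Chars.replace.go]
        by_cases hca : c = a
        · subst hca
          have hpre : List.isPrefixOf [c] (c :: t) = true := by
            simp [List.isPrefixOf]
          simp only [hpre, if_true, List.length_cons, List.length_nil, List.drop_succ_cons,
            List.drop_zero, List.reverse_cons, List.reverse_nil, List.nil_append,
            List.singleton_append]
          rw [ih n (b :: acc) (by simp at hle; omega)]
          simp
        · have hpre : List.isPrefixOf [a] (c :: t) = false := by
            simp [List.isPrefixOf]
            intro h; exact absurd h.symm hca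
          simp only [hpre]
          rw [ih n (c :: acc) (by simp at hle; omega)]
          simp [hca]

theorem ofList_toList_str (s : String) : String.ofList s.toList = s := by
  simp [String.ofList]

theorem replace_single (s : List Char) (a b : Char) :
    PySem.Chars.replace s [a] [b] = s.map (fun x => if x = a then b else x) := by
  have : PySem.Chars.replace s [a] [b]
      = PySem.Chars.replace.go [a] [b] s.length s [] := by
    simp [PySem.Chars.replace]
  rw [this, replace_go_single a b s s.length [] (le_refl _)]
  simp

theorem foldl_replace_mem (inv : List Char) (h : '_' ∉ inv) :
    ∀ (s : List Char),
      inv.foldl (fun r c => PySem.Chars.replace r [c] ['_']) s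
        = s.map (fun x => if x ∈ inv then '_' else x) := by
  induction inv with
  | nil => intro s; simp
  | cons c rest ih =>
      intro s
      have hrest : '_' ∉ rest := fun hm => h (List.mem_cons_of_mem _ hm)
      have hc : c ≠ '_' := fun hc => h (hc ▸ List.mem_cons_self)
      simp only [List.foldl_cons]
      rw [replace_single, ih hrest, List.map_map]
      apply List.map_congr_left
      intro x _
      by_cases hxc : x = c
      · subst hxc
        simp [hrest]
      · by_cases hxr : x ∈ rest <;> simp [hxc, hxr]

-- B's one pass computes the same pointwise map
theorem pvSanitize_eq_map (s : List Char) :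
    pvSanitize s = s.map (fun x => if x ∈ "<>:\"/\\|?*".toList then '_' else x) := by
  induction s with
  | nil => rfl
  | cons c t ih => simp [pvSanitize, ih]

-- B's index loop reaches exactly the dropWhile point
theorem drop_pvLeadCount (s : List Char) :
    s.drop (pvLeadCount s) = s.dropWhile (fun c => ([' ', '.'] : List Char).contains c) := by
  induction s with
  | nil => rfl
  | cons c t ih =>
      by_cases h1 : c = ' '
      · simp [pvLeadCount, h1, List.dropWhile, ih]
      · by_cases h2 : c = '.'
        · simp [pvLeadCount, h2, List.dropWhile, ih]
        · simp [pvLeadCount, h1, h2, List.dropWhile]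

-- B's pop loop is the reverse-dropWhile-reverse of A's strip
theorem pvTrimRight_eq (l : List Char) :
    pvTrimRight l
      = (l.reverse.dropWhile (fun c => ([' ', '.'] : List Char).contains c)).reverse := by
  induction hn : l.length using Nat.strong_induction_on generalizing l with
  | _ n ih =>
    by_cases hnil : l = []
    · subst hnil; simp [pvTrimRight]
    · obtain ⟨init, last, rfl⟩ : ∃ as a, l = as ++ [a] := by
        rcases List.eq_nil_or_concat l with h | ⟨as, a, h⟩
        · exact absurd h hnil
        · exact ⟨as, a, by simpa [List.concat_eq_append] using h⟩
      by_cases hlast : ([' ', '.'] : List Char).contains last = true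
      · rw [pvTrimRight]
        simp only [hnil, dite_false, List.getLast_append_singleton, hlast, if_true,
          List.dropLast_concat]
        rw [ih init.length (by subst hn; simp) init rfl]
        have hb : (decide (last = ' ') || decide (last = '.')) = true := by simpa using hlast
        simp [hb]
      · rw [pvTrimRight]
        simp only [hnil, dite_false, List.getLast_append_singleton, hlast]
        have hb : (decide (last = ' ') || decide (last = '.')) = false := by simpa using hlast
        simp [hb]

-- the two trim predicates are the same Bool function
theorem pred_eq :
    (fun c : Char => (['.', ' '] : List Char).contains c)
      = (fun c : Char => ([' ', '.'] : List Char).contains c) := by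
  funext c
  by_cases h1 : c = ' ' <;> by_cases h2 : c = '.' <;> simp [h1, h2]

-- A's conditional slice-to-100 equals B's unconditional take 100
theorem final_trunc (S : String) (L : List Char) (h : S.toList = L) :
    (if PySem.Str.len S > 100 then PySem.Str.slice S none (some 100) else S)
      = String.ofList (L.take 100) := by
  by_cases hlen : PySem.Str.len S > 100
  · rw [if_pos hlen]
    have h2 : (PySem.Str.slice S none (some 100)).toList = L.take 100 := by
      rw [PySem.Str.toList_slice, PySem.Chars.slice_eq_listSlice,
        PySem.List.slice_to S.toList (show (0:Int) ≤ 100 by norm_num), h]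
      simp
    calc PySem.Str.slice S none (some 100)
        = String.ofList (PySem.Str.slice S none (some 100)).toList :=
          (ofList_toList_str _).symm
      _ = String.ofList (L.take 100) := by rw [h2]
  · rw [if_neg hlen]
    have hlenL : L.length ≤ 100 := by
      rw [PySem.Str.len_eq, h] at hlen
      omega
    rw [List.take_of_length_le hlenL, ← h, ofList_toList_str]

-- ===== VERDICT (by name: the statement is the Claim_ definition above) =====
theorem clean_for_path_py_spec : Claim_equal_clean_for_path_py := by
  intro text _
  unfold Spec_clean_for_path_py clean_for_path_py clean_for_path_py_alt
  have hfoldlist : ∀ (inv : List Char) (r : String),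
      (inv.foldl (fun r char => PySem.Str.replace r (String.ofList [char]) "_") r).toList
      = inv.foldl (fun r c => PySem.Chars.replace r [c] ['_']) r.toList := by
    intro inv
    induction inv with
    | nil => intro r; simp
    | cons c t ih =>
        intro r
        simp only [List.foldl_cons]
        rw [ih]
        congr 1
        simp [PySem.Str.replace]
  have hAlist :
      ("<>:\"/\\|?*".toList.foldl
        (fun r char => PySem.Str.replace r (String.ofList [char]) "_") text).toList
      = pvSanitize text.toList := by
    rw [hfoldlist, foldl_replace_mem _ (by decide), pvSanitize_eq_map]
  have hstrip :
      (PySem.Str.stripChars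
        ("<>:\"/\\|?*".toList.foldl
          (fun r char => PySem.Str.replace r (String.ofList [char]) "_") text) ". ").toList
      = pvTrimRight ((pvSanitize text.toList).drop (pvLeadCount (pvSanitize text.toList))) := by
    rw [PySem.Str.toList_stripChars, hAlist, drop_pvLeadCount, pvTrimRight_eq]
    simp only [PySem.Chars.stripChars]
    rw [show ". ".toList = ['.', ' '] from by decide, pred_eq]
  exact final_trunc _ _ hstrip
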